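-- pv_equiv track=rewrite | github.com/oscarlidenbrock/freecodecamp | challenges/2026-03/05_smallest-gap.py | smallest_gap
-- ===== SOURCE A (Python) =====
-- def smallest_gap(input: str) -> str:
--     """
--     Return the gap string of the one string
--     :param input: the input string
--     :return: the gap
--     """
--     gap_chars = {}
--
--     # Search gap characters
--     for i in range(len(input)):
--         char = input[i]
--         if input[i:].count(char) > 1: gap_chars.setdefault(i, char)
--
--     debug("gap characters", gap_chars)
--
--     # search the minimal len gap in gaps array and store in gaps list
--     gaps = []
--     min_len = len(input)
--
--     for pos, gap_char in gap_chars.items():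
--         l_char = input.find(gap_char, pos)
--         r_char = input.find(gap_char, pos + 1)
--
--         gap = input[l_char + 1:r_char]
--         gaps.append(gap)
--
--         if len(gap) < min_len: min_len = len(gap)
--
--     debug("gaps", gaps)
--     debug("gap min length", min_len)
--
--     # find the gap with len == min_len
--     for gap in gaps:
--         if len(gap) == min_len:
--             return gap
--
--     return ""
--
-- debug_messages = []
--
-- def debug(type, message):
--     debug_messages.append([type, message])
-- ===== SOURCE B (Python) =====
-- def smallest_gap(input: str) -> str:
--     """O(n) single reverse pass: for each position the next occurrence of its
--     character comes from a dict, and the best (shortest, leftmost) gap is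
--     tracked on the fly."""
--     nxt = {}
--     best = None  # (left, right) endpoints of the best gap so far
--     for i in range(len(input) - 1, -1, -1):
--         c = input[i]
--         if c in nxt:
--             j = nxt[c]
--             if best is None or j - i <= best[1] - best[0]:
--                 best = (i, j)
--         nxt[c] = i
--     if best is None:
--         return ""
--     return input[best[0] + 1:best[1]]
-- ===== Notes on version B (the rewrite author's own statement) =====
-- stated objective: faster
-- what changed: Replaced the quadratic scan (a slice .count per position, then find() calls per candidate plus a final re-scan of the gaps list) by a single reverse pass that keeps a dict of the next occurrence of each character and tracks the best (shortest, leftmost) gap on the fly.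
import Mathlib
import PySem

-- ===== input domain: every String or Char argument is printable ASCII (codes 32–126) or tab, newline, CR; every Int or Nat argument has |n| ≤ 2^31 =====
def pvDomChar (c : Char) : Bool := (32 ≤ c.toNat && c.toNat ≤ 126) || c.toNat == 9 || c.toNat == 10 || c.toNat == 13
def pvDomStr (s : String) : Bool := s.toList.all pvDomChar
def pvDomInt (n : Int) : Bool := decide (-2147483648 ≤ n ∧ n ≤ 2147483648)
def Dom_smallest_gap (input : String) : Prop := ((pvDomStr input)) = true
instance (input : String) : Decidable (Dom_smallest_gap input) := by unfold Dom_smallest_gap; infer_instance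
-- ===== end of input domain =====

-- B replaces A's quadratic scan (a slice .count per index, find() per candidate, then a
-- re-scan of the gaps list) by one reverse pass with a next-occurrence dict that
-- tracks the best (shortest, leftmost) gap on the fly; objective: faster.

-- ===== PORT A =====
-- body of "for i in range(len(input)): char = input[i]; if input[i:].count(char) > 1: gap_chars.setdefault(i, char)"
def aScan (cs : List Char) (d : PySem.Dict Int Char) (i : Int) : PySem.Dict Int Char :=
  let char := PySem.List.pyGetD cs i ' '
  if 1 < PySem.Chars.count (PySem.List.slice cs (some i) none) [char] then d.setdefault i char
  else d

-- body of "for pos, gap_char in gap_chars.items(): … gaps.append(gap); if len(gap) < min_len: min_len = len(gap)"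
def aCollect (cs : List Char) (st : List (List Char) × Int) (pc : Int × Char) : List (List Char) × Int :=
  let l_char := PySem.Chars.findFrom cs [pc.2] pc.1
  let r_char := PySem.Chars.findFrom cs [pc.2] (pc.1 + 1)
  let gap := PySem.List.slice cs (some (l_char + 1)) (some r_char)
  (st.1 ++ [gap], if ((gap.length : Int) < st.2) then (gap.length : Int) else st.2)

def smallest_gap (input : String) : String :=
  let cs := input.toList
  let gap_chars := (PySem.List.pyRange 0 (PySem.Str.len input)).foldl (aScan cs) PySem.Dict.empty
  let st := gap_chars.items.foldl (aCollect cs) ([], PySem.Str.len input)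
  -- "for gap in gaps: if len(gap) == min_len: return gap / return ''"
  match st.1.find? (fun gap => ((gap.length : Int) == st.2)) with
  | some gap => String.ofList gap
  | none => ""

-- ===== PORT B =====
-- body of "for i in range(len(input)-1, -1, -1): c = input[i]; if c in nxt: …; nxt[c] = i"
def altStep (cs : List Char) (st : PySem.Dict Char Int × Option (Int × Int)) (i : Int) :
    PySem.Dict Char Int × Option (Int × Int) :=
  let c := PySem.List.pyGetD cs i ' '
  let best :=
    match st.1.get? c with
    | some j =>
      match st.2 with
      | none => some (i, j)
      | some b => if j - i ≤ b.2 - b.1 then some (i, j) else st.2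
    | none => st.2
  (st.1.insert c i, best)

def smallest_gap_alt (input : String) : String :=
  let cs := input.toList
  let st := (PySem.List.pyRange (PySem.Str.len input - 1) (-1) (-1)).foldl (altStep cs)
      (PySem.Dict.empty, none)
  match st.2 with
  | none => ""
  | some b => String.ofList (PySem.List.slice cs (some (b.1 + 1)) (some b.2))

-- ===== PRECONDITION & SPEC =====
def Spec_smallest_gap (input : String) (out : String) : Prop := out = smallest_gap_alt input
instance (input : String) (out : String) : Decidable (Spec_smallest_gap input out) := by unfold Spec_smallest_gap; infer_instance

-- ===== CLAIM (what is proved, stated in full; the proofs are below) =====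
def Claim_equal_smallest_gap : Prop := ∀ (input : String), Dom_smallest_gap input → Spec_smallest_gap input (smallest_gap input)

-- ===== LEMMAS AND PROOFS =====

/-- The gap between a candidate pair of positions `(p.1, p.2)`. -/
def gapN (cs : List Char) (p : Nat × Nat) : List Char :=
  List.take (p.2 - (p.1 + 1)) (List.drop (p.1 + 1) cs)

/-- Index (relative) of the first occurrence of `c`. -/
def nxtIdx? (c : Char) : List Char → Option Nat
  | [] => none
  | a :: t => if a = c then some 0 else (nxtIdx? c t).map (· + 1)

/-- The dict of next occurrences that B's loop has built after processing `cs.drop i`. -/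
def nmOf : List Char → Nat → PySem.Dict Char Int
  | [], _ => PySem.Dict.empty
  | c :: t, i => (nmOf t (i + 1)).insert c (i : Int)

/-- All candidate pairs (position, next occurrence of its char), by ascending position. -/
def candOf : List Char → Nat → List (Nat × Nat)
  | [], _ => []
  | c :: t, i =>
    (match nxtIdx? c t with
     | some k => [(i, i + 1 + k)]
     | none => []) ++ candOf t (i + 1)

/-- What B's running best computes over the candidate list. -/
def bestO : List (Nat × Nat) → Option (Int × Int)
  | [] => none
  | p :: L =>
    match bestO L with
    | none => some ((p.1 : Int), (p.2 : Int))
    | some b => if (p.2 : Int) - (p.1 : Int) ≤ b.2 - b.1 then some ((p.1 : Int), (p.2 : Int)) else some b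

def ilen (p : Nat × Nat) : Int := (p.2 : Int) - (p.1 : Int) - 1

def minL : List Int → Option Int
  | [] => none
  | x :: xs =>
    match minL xs with
    | none => some x
    | some v => some (min x v)

theorem bestO_cons (p : Nat × Nat) (L : List (Nat × Nat)) :
    bestO (p :: L) = match bestO L with
      | none => some ((p.1 : Int), (p.2 : Int))
      | some b => if (p.2 : Int) - (p.1 : Int) ≤ b.2 - b.1
          then some ((p.1 : Int), (p.2 : Int)) else some b := rfl

/-- A's running minimum over the gap lengths. -/
def minI (cs : List Char) (m : Int) (K : List (Nat × Nat)) : Int :=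
  K.foldl (fun m p => if ((gapN cs p).length : Int) < m then ((gapN cs p).length : Int) else m) m

theorem count_go_single (c : Char) : ∀ (fuel : Nat) (l : List Char) (acc : Nat),
    l.length ≤ fuel → PySem.Chars.count.go [c] fuel l acc = acc + l.count c := by
  intro fuel
  induction fuel with
  | zero =>
    intro l acc h
    cases l with
    | nil => simp [PySem.Chars.count.go]
    | cons a t => simp at h
  | succ fuel ih =>
    intro l acc h
    cases l with
    | nil => simp [PySem.Chars.count.go]
    | cons a t =>
      simp only [List.length_cons] at h
      by_cases hca : c = a
      · subst hca
        rw [show PySem.Chars.count.go [c] (fuel + 1) (c :: t) acc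
            = PySem.Chars.count.go [c] fuel t (acc + 1) by simp [PySem.Chars.count.go]]
        rw [ih t (acc + 1) (by omega), List.count_cons_self]
        omega
      · rw [show PySem.Chars.count.go [c] (fuel + 1) (a :: t) acc
            = PySem.Chars.count.go [c] fuel t acc by
          simp [PySem.Chars.count.go, List.isPrefixOf, hca]]
        rw [ih t acc (by omega)]
        have : (a :: t).count c = t.count c := by
          simp [Ne.symm hca]
        rw [this]

theorem count_single (s : List Char) (c : Char) : PySem.Chars.count s [c] = s.count c := by
  simp only [PySem.Chars.count, List.isEmpty_cons, Bool.false_eq_true, if_false]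
  simpa using count_go_single c s.length s 0 le_rfl

theorem getD_drop (s : List Char) (a m : Nat) :
    (s.drop a).getD m ' ' = s.getD (a + m) ' ' := by
  simp [List.getD_eq_getElem?_getD, List.getElem?_drop]

theorem single_prefix_iff (c : Char) (l : List Char) : [c] <+: l ↔ l.head? = some c := by
  cases l with
  | nil => simp
  | cons a t => simp [List.cons_prefix_cons, eq_comm]

theorem find_single_eq (s : List Char) (c : Char) (k : Nat) (hk : k < s.length)
    (h1 : s.getD k ' ' = c) (h2 : ∀ m, m < k → s.getD m ' ' ≠ c) :
    PySem.Chars.find s [c] = (k : Int) := by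
  have hget : ∀ m, m < s.length → s[m]? = some (s.getD m ' ') := by
    intro m hm
    simp [List.getD_eq_getElem?_getD, List.getElem?_eq_getElem hm]
  have hpre : [c] <+: s.drop k := by
    rw [single_prefix_iff, List.head?_drop, hget k hk, h1]
  have hinf : [c] <:+: s := by
    obtain ⟨u, hu⟩ := hpre
    exact ⟨s.take k, u, by rw [List.append_assoc, hu, List.take_append_drop]⟩
  have h0 : 0 ≤ PySem.Chars.find s [c] := (PySem.Chars.find_nonneg_iff s [c]).2 hinf
  obtain ⟨hp, hmin⟩ := PySem.Chars.find_spec h0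
  rcases lt_trichotomy (PySem.Chars.find s [c]).toNat k with hlt | heq | hgt
  · exfalso
    rw [single_prefix_iff, List.head?_drop, hget _ (by omega)] at hp
    exact h2 _ hlt (by simpa using hp)
  · rw [← heq, Int.toNat_of_nonneg h0]
  · exact absurd hpre (hmin k hgt)

theorem findFrom_at (s : List Char) (a : Nat) (ha : a < s.length) :
    PySem.Chars.findFrom s [s.getD a ' '] (a : Int) = (a : Int) := by
  rw [PySem.Chars.findFrom_natCast s _ a (le_of_lt ha)]
  have h0 : PySem.Chars.find (s.drop a) [s.getD a ' '] = ((0 : Nat) : Int) := by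
    apply find_single_eq
    · simp
      omega
    · rw [getD_drop]
      norm_num
    · intro m hm
      exact absurd hm (Nat.not_lt_zero m)
  rw [h0]
  norm_num

theorem findFrom_next (s : List Char) (p : Nat × Nat) (h1 : p.1 < p.2) (h2 : p.2 < s.length)
    (hc : s.getD p.2 ' ' = s.getD p.1 ' ')
    (hm : ∀ m, p.1 < m → m < p.2 → s.getD m ' ' ≠ s.getD p.1 ' ') :
    PySem.Chars.findFrom s [s.getD p.1 ' '] ((p.1 : Int) + 1) = (p.2 : Int) := by
  have hc1 : ((p.1 : Int) + 1) = ((p.1 + 1 : Nat) : Int) := by push_cast; ring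
  rw [hc1, PySem.Chars.findFrom_natCast s _ (p.1 + 1) (by omega)]
  have hf : PySem.Chars.find (s.drop (p.1 + 1)) [s.getD p.1 ' '] = ((p.2 - (p.1 + 1) : Nat) : Int) := by
    apply find_single_eq
    · simp
      omega
    · rw [getD_drop]
      rw [show p.1 + 1 + (p.2 - (p.1 + 1)) = p.2 by omega]
      exact hc
    · intro m hmk
      rw [getD_drop]
      exact hm _ (by omega) (by omega)
  rw [hf]
  rw [if_neg (by omega)]
  omega

theorem nxtIdx?_isSome_iff (c : Char) (t : List Char) : (nxtIdx? c t).isSome = true ↔ c ∈ t := by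
  induction t with
  | nil => simp [nxtIdx?]
  | cons a t ih =>
    by_cases hac : a = c
    · simp [nxtIdx?, hac]
    · simp [nxtIdx?, hac, ih, Ne.symm hac]

theorem nxtIdx?_spec (c : Char) : ∀ (t : List Char) (k : Nat), nxtIdx? c t = some k →
    k < t.length ∧ t.getD k ' ' = c ∧ ∀ m, m < k → t.getD m ' ' ≠ c := by
  intro t
  induction t with
  | nil => intro k h; simp [nxtIdx?] at h
  | cons a t ih =>
    intro k h
    by_cases hac : a = c
    · simp [nxtIdx?, hac] at h
      subst h
      exact ⟨by simp, by simp [hac], by omega⟩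
    · simp [nxtIdx?, hac] at h
      obtain ⟨k', hk', rfl⟩ := h
      obtain ⟨ha, hb, hc2⟩ := ih k' hk'
      refine ⟨by simpa using ha, by simpa using hb, ?_⟩
      intro m hmk
      cases m with
      | zero => simpa using hac
      | succ m => simpa using hc2 m (by omega)

theorem nm_get (c : Char) : ∀ (t : List Char) (i : Nat),
    (nmOf t i).get? c = (nxtIdx? c t).map (fun k => ((i + k : Nat) : Int)) := by
  intro t
  induction t with
  | nil => intro i; simp [nmOf, nxtIdx?, PySem.Dict.get?_empty]
  | cons a t ih =>
    intro i
    rw [show nmOf (a :: t) i = (nmOf t (i + 1)).insert a (i : Int) from rfl]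
    rw [PySem.Dict.get?_insert]
    by_cases hca : c = a
    · simp [nxtIdx?, hca]
    · rw [if_neg hca, ih]
      rw [show nxtIdx? c (a :: t) = (nxtIdx? c t).map (· + 1) from by
        simp [nxtIdx?, Ne.symm hca]]
      cases nxtIdx? c t with
      | none => simp
      | some k =>
        simp only [Option.map_some]
        congr 1
        omega

theorem cand_mem (cs : List Char) : ∀ (t : List Char) (i : Nat), cs.drop i = t →
    ∀ p ∈ candOf t i, p.1 < p.2 ∧ p.2 < cs.length ∧ cs.getD p.2 ' ' = cs.getD p.1 ' ' ∧
      ∀ m, p.1 < m → m < p.2 → cs.getD m ' ' ≠ cs.getD p.1 ' ' := by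
  intro t
  induction t with
  | nil => intro i _ p hp; simp [candOf] at hp
  | cons c t ih =>
    intro i hd p hp
    have hlen : cs.length = i + 1 + t.length := by
      have := congrArg List.length hd
      simp at this
      omega
    have hd1 : cs.drop (i + 1) = t := by
      rw [← List.drop_drop, hd]
      rfl
    have hgd : cs.getD i ' ' = c := by
      have := getD_drop cs i 0
      rw [hd] at this
      simpa using this.symm
    have hgt : ∀ m, cs.getD (i + 1 + m) ' ' = t.getD m ' ' := by
      intro m
      have := getD_drop cs (i + 1) m
      rw [hd1] at this
      exact this.symm
    simp only [candOf] at hp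
    rcases List.mem_append.1 hp with hp1 | hp2
    · cases hx : nxtIdx? c t with
      | none => simp [hx] at hp1
      | some k =>
        rw [hx] at hp1
        simp at hp1
        obtain ⟨hk, hkc, hkm⟩ := nxtIdx?_spec c t k hx
        subst hp1
        refine ⟨by omega, by omega, ?_, ?_⟩
        · show cs.getD (i + 1 + k) ' ' = cs.getD i ' '
          rw [hgd, hgt k, hkc]
        · intro m hm1 hm2
          show cs.getD m ' ' ≠ cs.getD i ' '
          rw [hgd]
          simp only [] at hm1 hm2
          have hmform : m = i + 1 + (m - (i + 1)) := by omega
          rw [hmform, hgt]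
          exact hkm _ (by omega)
    · exact ih (i + 1) hd1 p hp2

theorem A_dict_items (cs : List Char) : ∀ (l : List Int) (d : PySem.Dict Int Char),
    l.Nodup → (∀ i ∈ l, d.contains i = false) →
    (l.foldl (aScan cs) d).items
      = d.items ++ (l.filter (fun i =>
          decide (1 < PySem.Chars.count (PySem.List.slice cs (some i) none) [PySem.List.pyGetD cs i ' ']))).map
          (fun i => (i, PySem.List.pyGetD cs i ' ')) := by
  intro l
  induction l with
  | nil => intro d _ _; simp
  | cons i l ih =>
    intro d hnd hfree
    have hfi : d.contains i = false := hfree i (by simp)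
    rw [List.foldl_cons]
    by_cases h : 1 < PySem.Chars.count (PySem.List.slice cs (some i) none) [PySem.List.pyGetD cs i ' ']
    · have hstep : aScan cs d i = d.insert i (PySem.List.pyGetD cs i ' ') := by
        simp only [aScan, if_pos h]
        exact PySem.Dict.setdefault_of_not_contains d _ hfi
      rw [hstep, ih _ (List.nodup_cons.1 hnd).2 ?_]
      · rw [PySem.Dict.items_insert_of_not_contains d _ hfi]
        simp [h]
      · intro j hj
        rw [PySem.Dict.contains_insert]
        have hji : j ≠ i := fun hh => (List.nodup_cons.1 hnd).1 (hh ▸ hj)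
        simp [hji, hfree j (by simp [hj])]
    · have hstep : aScan cs d i = d := by simp only [aScan, if_neg h]
      rw [hstep, ih _ (List.nodup_cons.1 hnd).2 (fun j hj => hfree j (by simp [hj]))]
      simp [h]

theorem aCond_eq (cs : List Char) (k : Nat) (hk : k < cs.length) :
    (decide (1 < PySem.Chars.count (PySem.List.slice cs (some ((k : Nat) : Int)) none)
        [PySem.List.pyGetD cs ((k : Nat) : Int) ' ']))
      = (nxtIdx? (cs.getD k ' ') (cs.drop (k + 1))).isSome := by
  rw [PySem.List.slice_from_natCast, PySem.List.pyGetD_natCast]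
  have hdk : cs.drop k = cs.getD k ' ' :: cs.drop (k + 1) := by
    rw [List.drop_eq_getElem_cons hk]
    congr 1
    simp [List.getD_eq_getElem?_getD, List.getElem?_eq_getElem hk]
  rw [count_single, hdk, List.count_cons_self]
  by_cases hmem : cs.getD k ' ' ∈ cs.drop (k + 1)
  · have hcp : 0 < (cs.drop (k + 1)).count (cs.getD k ' ') := List.count_pos_iff.2 hmem
    rw [show (nxtIdx? (cs.getD k ' ') (cs.drop (k + 1))).isSome = true from
      (nxtIdx?_isSome_iff _ _).2 hmem]
    simp only [decide_eq_true_eq]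
    omega
  · have hcp : (cs.drop (k + 1)).count (cs.getD k ' ') = 0 := by
      rwa [List.count_eq_zero]
    have hns : (nxtIdx? (cs.getD k ' ') (cs.drop (k + 1))).isSome = false := by
      rw [← Bool.not_eq_true, nxtIdx?_isSome_iff]
      exact hmem
    rw [hns, hcp]
    decide

theorem A_keysN (cs : List Char) : ∀ (t : List Char) (i : Nat), cs.drop i = t →
    (List.range' i t.length).filter
        (fun k => (nxtIdx? (cs.getD k ' ') (cs.drop (k + 1))).isSome)
      = (candOf t i).map (fun p => p.1) := by
  intro t
  induction t with
  | nil => intro i _; simp [candOf]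
  | cons c t ih =>
    intro i hd
    have hd1 : cs.drop (i + 1) = t := by rw [← List.drop_drop, hd]; rfl
    have hgd : cs.getD i ' ' = c := by
      have := getD_drop cs i 0
      rw [hd] at this
      simpa using this.symm
    rw [show (c :: t).length = t.length + 1 from rfl, List.range'_succ, List.filter_cons]
    rw [hgd, hd1]
    simp only [candOf]
    cases hx : nxtIdx? c t with
    | none =>
      rw [if_neg (by simp)]
      show _ = List.map (fun p : Nat × Nat => p.1) (([] : List (Nat × Nat)) ++ candOf t (i + 1))
      rw [List.nil_append]
      exact ih (i + 1) hd1
    | some k =>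
      rw [if_pos (by simp : (some k).isSome = true)]
      show _ = List.map (fun p : Nat × Nat => p.1) ([(i, i + 1 + k)] ++ candOf t (i + 1))
      rw [List.singleton_append, List.map_cons]
      rw [ih (i + 1) hd1]

theorem pairfold (cs : List Char) : ∀ (K : List (Nat × Nat)) (acc : List (List Char)) (m : Int),
    K.foldl (fun st p => (st.1 ++ [gapN cs p],
        if ((gapN cs p).length : Int) < st.2 then ((gapN cs p).length : Int) else st.2)) (acc, m)
      = (acc ++ K.map (gapN cs), minI cs m K) := by
  intro K
  induction K with
  | nil => intro acc m; simp [minI]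
  | cons p K ih =>
    intro acc m
    rw [List.foldl_cons, ih]
    simp [minI, List.foldl_cons]

theorem minI_eq (cs : List Char) : ∀ (K : List (Nat × Nat)) (m : Int),
    minI cs m K = match minL (K.map (fun p => ((gapN cs p).length : Int))) with
      | none => m
      | some v => min m v := by
  intro K
  induction K with
  | nil => intro m; simp [minI, minL]
  | cons p K ih =>
    intro m
    have h1 : minI cs m (p :: K)
        = minI cs (if ((gapN cs p).length : Int) < m then ((gapN cs p).length : Int) else m) K := by
      simp [minI, List.foldl_cons]
    rw [h1, ih]
    simp only [List.map_cons, minL]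
    cases htail : minL (K.map (fun p => ((gapN cs p).length : Int))) with
    | none =>
      simp only [min_def]
      split_ifs <;> omega
    | some v =>
      simp only [min_def]
      split_ifs <;> omega

theorem minL_spec : ∀ (xs : List Int), xs ≠ [] →
    ∃ v, minL xs = some v ∧ v ∈ xs ∧ ∀ w ∈ xs, v ≤ w := by
  intro xs
  induction xs with
  | nil => intro h; exact absurd rfl h
  | cons x xs ih =>
    intro _
    by_cases hxs : xs = []
    · subst hxs
      exact ⟨x, by simp [minL], by simp, by simp⟩
    · obtain ⟨v, hv, hvm, hvle⟩ := ih hxs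
      refine ⟨min x v, by simp only [minL, hv], ?_, ?_⟩
      · rcases le_total x v with h | h
        · simp [min_eq_left h]
        · rw [min_eq_right h]
          exact List.mem_cons_of_mem x hvm
      · intro w hw
        rcases List.mem_cons.1 hw with rfl | hw'
        · exact min_le_left _ _
        · exact le_trans (min_le_right _ _) (hvle w hw')

theorem find?_congr_mem {α : Type} (l : List α) (p q : α → Bool) (h : ∀ x ∈ l, p x = q x) :
    l.find? p = l.find? q := by
  induction l with
  | nil => rfl
  | cons a l ih =>
    rw [List.find?_cons, List.find?_cons, h a (by simp)]
    cases q a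
    · exact ih (fun x hx => h x (by simp [hx]))
    · rfl

theorem bestO_char : ∀ (K : List (Nat × Nat)), (∀ p ∈ K, p.1 < p.2) →
    bestO K = (K.find? (fun p => (ilen p == (minL (K.map ilen)).getD 0))).map
      (fun p => ((p.1 : Int), (p.2 : Int))) := by
  intro K
  induction K with
  | nil => intro _; rfl
  | cons p L ih =>
    intro hG
    by_cases hLe : L = []
    · subst hLe
      simp [bestO, minL]
    · obtain ⟨v, hv, hvm, hvle⟩ := minL_spec (L.map ilen) (by simpa using hLe)
      obtain ⟨q1, hq1L, hq1v⟩ := List.mem_map.1 hvm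
      have hfind : ∃ q, L.find? (fun p => (ilen p == (minL (L.map ilen)).getD 0)) = some q := by
        cases hf : L.find? (fun p => (ilen p == (minL (L.map ilen)).getD 0)) with
        | some q => exact ⟨q, rfl⟩
        | none =>
          exfalso
          have := (List.find?_eq_none.1 hf) q1 hq1L
          rw [hv] at this
          simp [hq1v] at this
      obtain ⟨q, hq⟩ := hfind
      have hqmem : q ∈ L := List.mem_of_find?_eq_some hq
      have hqv : ilen q = v := by
        have := List.find?_some hq
        rw [hv] at this
        simpa using this
      have hIH := ih (fun r hr => hG r (List.mem_cons_of_mem p hr))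
      rw [hq] at hIH
      have hminc : minL ((p :: L).map ilen) = some (min (ilen p) v) := by
        rw [List.map_cons]
        simp [minL, hv]
      rw [show bestO (p :: L) = (match bestO L with
          | none => some ((p.1 : Int), (p.2 : Int))
          | some b => if (p.2 : Int) - (p.1 : Int) ≤ b.2 - b.1
              then some ((p.1 : Int), (p.2 : Int)) else some b) from rfl]
      rw [hIH]
      simp only [Option.map_some]
      rw [hminc, List.find?_cons]
      rcases le_total (ilen p) v with hle | hgt
      · have hcond : ((p.2 : Int) - (p.1 : Int) ≤ (q.2 : Int) - (q.1 : Int)) := by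
          have h' : ilen p ≤ ilen q := by rw [hqv]; exact hle
          simp only [ilen] at h'
          omega
        rw [if_pos hcond]
        rw [show (ilen p == (some (min (ilen p) v)).getD 0) = true from by
          simp [min_eq_left hle]]
        rfl
      · by_cases heq : ilen p = v
        · have hcond : ((p.2 : Int) - (p.1 : Int) ≤ (q.2 : Int) - (q.1 : Int)) := by
            have h' : ilen p ≤ ilen q := by rw [hqv, heq]
            simp only [ilen] at h'
            omega
          rw [if_pos hcond]
          rw [show (ilen p == (some (min (ilen p) v)).getD 0) = true from by
            simp [heq]]
          rfl
        · have hvlt : v < ilen p := lt_of_le_of_ne hgt (fun h => heq h.symm)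
          have hcond : ¬ ((p.2 : Int) - (p.1 : Int) ≤ (q.2 : Int) - (q.1 : Int)) := by
            have h' : ilen q < ilen p := by rw [hqv]; exact hvlt
            simp only [ilen] at h'
            omega
          rw [if_neg hcond]
          rw [show (ilen p == (some (min (ilen p) v)).getD 0) = false from by
            simp only [Option.getD_some, min_eq_right hgt]
            simp only [beq_eq_false_iff_ne, ne_eq]
            omega]
          rw [show (fun r => (ilen r == (some (min (ilen p) v)).getD 0))
              = (fun r => (ilen r == (minL (L.map ilen)).getD 0)) from by
            funext r
            rw [hv]
            simp [min_eq_right hgt]]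
          rw [hq]
          rfl

theorem Achar (input : String) :
    smallest_gap input =
      match ((candOf input.toList 0).map (gapN input.toList)).find?
          (fun g => ((g.length : Int) == minI input.toList (input.toList.length : Int)
            (candOf input.toList 0))) with
      | some g => String.ofList g
      | none => "" := by
  have hG := cand_mem input.toList input.toList 0 (by simp)
  simp only [smallest_gap]
  rw [PySem.Str.len_eq]
  rw [A_dict_items input.toList _ PySem.Dict.empty (PySem.List.nodup_pyRange_one _ _)
      (fun i _ => PySem.Dict.contains_empty i)]
  rw [PySem.List.pyRange_zero_nat, List.filter_map, List.map_map]
  simp only [Function.comp_def]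
  rw [List.filter_congr
      (q := fun k => (nxtIdx? (input.toList.getD k ' ') (input.toList.drop (k + 1))).isSome)
      (fun k hk => aCond_eq input.toList k (List.mem_range.1 hk))]
  rw [List.range_eq_range', A_keysN input.toList input.toList 0 (by simp), List.map_map]
  rw [List.map_congr_left
      (g := fun p : Nat × Nat => (((p.1 : Nat) : Int), input.toList.getD p.1 ' '))
      (fun p hp => by simp [PySem.List.pyGetD_natCast])]
  rw [show (PySem.Dict.empty : PySem.Dict Int Char).items = [] from rfl]
  rw [List.nil_append]
  rw [List.foldl_map]
  rw [PySem.List.foldl_congr_mem _ _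
      (fun st p => (st.1 ++ [gapN input.toList p],
        if ((gapN input.toList p).length : Int) < st.2
        then ((gapN input.toList p).length : Int) else st.2)) _
      (fun acc p hp => by
        obtain ⟨h1, h2, hc, hm⟩ := hG p hp
        simp only [aCollect]
        rw [findFrom_at input.toList p.1 (by omega)]
        rw [findFrom_next input.toList p h1 h2 hc hm]
        rw [show ((p.1 : Int) + 1) = ((p.1 + 1 : Nat) : Int) by push_cast; ring]
        rw [PySem.List.slice_natCast]
        rfl)]
  rw [pairfold]
  rfl

theorem B_fold (cs : List Char) : ∀ (t : List Char) (i : Nat), cs.drop i = t →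
    ((PySem.List.pyRange (i : Int) (cs.length : Int)).reverse).foldl (altStep cs)
        (PySem.Dict.empty, none)
      = (nmOf t i, bestO (candOf t i)) := by
  intro t
  induction t with
  | nil =>
    intro i hd
    rw [PySem.List.pyRange_one_eq_nil (by exact_mod_cast List.drop_eq_nil_iff.1 hd)]
    simp [nmOf, candOf, bestO]
  | cons c t ih =>
    intro i hd
    have hi : i < cs.length := by
      by_contra h
      have := congrArg List.length hd
      simp at this
      omega
    have hd1 : cs.drop (i + 1) = t := by rw [← List.drop_drop, hd]; rfl
    have hgd : cs.getD i ' ' = c := by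
      have := getD_drop cs i 0
      rw [hd] at this
      simpa using this.symm
    rw [PySem.List.pyRange_one_cons (by exact_mod_cast hi)]
    rw [List.reverse_cons, List.foldl_append]
    rw [show ((i : Int) + 1) = ((i + 1 : Nat) : Int) by push_cast; ring]
    rw [ih (i + 1) hd1]
    simp only [List.foldl_cons, List.foldl_nil]
    simp only [altStep, PySem.List.pyGetD_natCast]
    rw [hgd, nm_get]
    cases hx : nxtIdx? c t with
    | none =>
      simp only [Option.map_none]
      rw [show candOf (c :: t) i = candOf t (i + 1) from by simp [candOf, hx]]
      rfl
    | some k =>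
      simp only [Option.map_some]
      rw [show candOf (c :: t) i = (i, i + 1 + k) :: candOf t (i + 1) from by simp [candOf, hx]]
      rw [bestO_cons]
      cases hb : bestO (candOf t (i + 1)) with
      | none => rfl
      | some b => rfl

theorem Bchar (input : String) :
    smallest_gap_alt input =
      match bestO (candOf input.toList 0) with
      | none => ""
      | some b => String.ofList (PySem.List.slice input.toList (some (b.1 + 1)) (some b.2)) := by
  simp only [smallest_gap_alt]
  have hrange : PySem.List.pyRange (PySem.Str.len input - 1) (-1) (-1)
      = (PySem.List.pyRange (((0 : Nat) : Int)) (input.toList.length : Int)).reverse := by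
    rw [PySem.List.pyRange_neg_one_eq_reverse]
    norm_num [PySem.Str.len_eq]
  rw [hrange, B_fold input.toList input.toList 0 (by simp)]

theorem gap_select (input : String) :
    (match ((candOf input.toList 0).map (gapN input.toList)).find?
        (fun g => ((g.length : Int) == minI input.toList (input.toList.length : Int)
          (candOf input.toList 0))) with
      | some g => String.ofList g
      | none => "")
    = match bestO (candOf input.toList 0) with
      | none => ""
      | some b => String.ofList (PySem.List.slice input.toList (some (b.1 + 1)) (some b.2)) := by
  have hG := cand_mem input.toList input.toList 0 (by simp)
  by_cases hKe : candOf input.toList 0 = []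
  · rw [hKe]
    rfl
  · have hlt : ∀ p ∈ candOf input.toList 0, p.1 < p.2 := fun p hp => (hG p hp).1
    have hlen : ∀ p ∈ candOf input.toList 0, ((gapN input.toList p).length : Int) = ilen p := by
      intro p hp
      obtain ⟨h1, h2, -, -⟩ := hG p hp
      rw [show (gapN input.toList p).length = p.2 - p.1 - 1 from by
        rw [gapN, List.length_take, List.length_drop]
        omega]
      simp only [ilen]
      omega
    have hmap : (candOf input.toList 0).map (fun p => ((gapN input.toList p).length : Int))
        = (candOf input.toList 0).map ilen := List.map_congr_left hlen
    obtain ⟨v, hv, hvm, hvle⟩ := minL_spec ((candOf input.toList 0).map ilen) (by simpa using hKe)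
    obtain ⟨q1, hq1, hq1v⟩ := List.mem_map.1 hvm
    have hvlt : v < (input.toList.length : Int) := by
      obtain ⟨h1, h2, -, -⟩ := hG q1 hq1
      rw [← hq1v]
      simp only [ilen]
      omega
    have hminI : minI input.toList (input.toList.length : Int) (candOf input.toList 0) = v := by
      rw [minI_eq, hmap, hv]
      exact min_eq_right (le_of_lt hvlt)
    rw [List.find?_map]
    rw [find?_congr_mem _ _ (fun p => (ilen p == v))
      (fun p hp => by
        simp only [Function.comp_apply]
        rw [hlen p hp, hminI])]
    have hfind : ∃ q, (candOf input.toList 0).find? (fun p => (ilen p == v)) = some q := by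
      cases hf : (candOf input.toList 0).find? (fun p => (ilen p == v)) with
      | some q => exact ⟨q, rfl⟩
      | none =>
        exfalso
        have := (List.find?_eq_none.1 hf) q1 hq1
        simp [hq1v] at this
    obtain ⟨q, hq⟩ := hfind
    rw [hq]
    rw [bestO_char _ hlt, hv]
    simp only [Option.getD_some]
    rw [hq]
    simp only [Option.map_some]
    obtain ⟨h1, h2, -, -⟩ := hG q (List.mem_of_find?_eq_some hq)
    rw [show ((q.1 : Int) + 1) = ((q.1 + 1 : Nat) : Int) by push_cast; ring]
    rw [PySem.List.slice_natCast]
    rfl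

-- ===== VERDICT (by name: the statement is the Claim_ definition above) =====
theorem smallest_gap_spec : Claim_equal_smallest_gap := by
  unfold Claim_equal_smallest_gap
  intro input _
  unfold Spec_smallest_gap
  rw [Achar, Bchar, gap_select]
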